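-- pv_equiv track=rewrite | github.com/fabioc-aloha/LogoScraper | utils/text_renderer.py | split_into_lines
-- ===== SOURCE A (Python) =====
-- def split_into_lines(text, max_lines):
--     """Split text into optimal lines for display."""
--     words = text.split()
--     if len(words) <= max_lines:
--         return words
--
--     chars_per_line = len(text) // max_lines
--     lines = []
--     current_line = []
--     current_length = 0
--
--     for word in words:
--         if current_length + len(word) > chars_per_line and len(lines) < max_lines - 1:
--             lines.append(' '.join(current_line))
--             current_line = [word]
--             current_length = len(word)
--         else:
--             current_line.append(word)
--             current_length += len(word)
--
--     if current_line:
--         lines.append(' '.join(current_line))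
--
--     return lines
-- ===== SOURCE B (Python) =====
-- def split_into_lines(text, max_lines):
--     """Split text into optimal lines for display."""
--     words = text.split()
--     if len(words) <= max_lines:
--         return words
--
--     chars_per_line = len(text) // max_lines
--     lines = []
--     rest = words
--     while len(lines) < max_lines - 1 and rest:
--         length = len(rest[0])
--         line = [rest[0]]
--         rest = rest[1:]
--         while rest and length + len(rest[0]) <= chars_per_line:
--             length += len(rest[0])
--             line.append(rest[0])
--             rest = rest[1:]
--         lines.append(' '.join(line))
--     if rest:
--         lines.append(' '.join(rest))
--     return lines
-- ===== Notes on version B (the rewrite author's own statement) =====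
-- stated objective: alternative
-- what changed: Replaced A's single flat fold over all words with mutable break-state by a nested two-level loop that builds one line at a time (inner loop consumes words while they fit, outer loop counts lines and dumps the remainder into the last line), and B always puts at least one word on a line instead of A's accidental empty first line.
-- intended difference: When the first word alone is longer than len(text)//max_lines (with max_lines >= 2 and more words than max_lines), A returns an empty string as its first line (' '.join of the still-empty current line); B starts the first line with that word, which is the intended split. — e.g. on split_into_lines("abcde f g", 2): A returns ["", "abcde f g"], B returns ["abcde", "f g"]
import Mathlib
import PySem

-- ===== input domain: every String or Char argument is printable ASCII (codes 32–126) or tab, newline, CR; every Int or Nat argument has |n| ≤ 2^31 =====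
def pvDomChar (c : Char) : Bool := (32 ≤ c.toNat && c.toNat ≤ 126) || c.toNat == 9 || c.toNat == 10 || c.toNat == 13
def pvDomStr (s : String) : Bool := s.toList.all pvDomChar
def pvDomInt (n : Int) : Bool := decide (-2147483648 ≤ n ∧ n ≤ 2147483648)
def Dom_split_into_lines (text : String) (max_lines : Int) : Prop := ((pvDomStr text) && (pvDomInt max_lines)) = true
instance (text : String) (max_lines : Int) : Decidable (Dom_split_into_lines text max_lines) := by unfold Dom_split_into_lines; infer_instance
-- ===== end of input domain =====

-- B re-implements A's greedy line filler as a nested line-by-line loop (alternative decomposition, same cost);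
-- B intentionally never emits A's accidental empty first line (see D_ below). Same return values elsewhere.

-- ===== PORT A =====
-- one step of A's for-loop over words; state = (lines, current_line, current_length)
def splitStepA (cpl ml : Int) (st : List String × List String × Int) (w : String) :
    List String × List String × Int :=
  let (lines, cur, clen) := st
  if clen + PySem.Str.len w > cpl ∧ (lines.length : Int) < ml - 1 then
    (lines ++ [PySem.Str.join " " cur], [w], PySem.Str.len w)
  else
    (lines, cur ++ [w], clen + PySem.Str.len w)

def split_into_lines (text : String) (max_lines : Int) : List String :=
  let words := PySem.Str.split₀ text
  if (words.length : Int) ≤ max_lines then words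
  else
    let cpl := PySem.Int.floordiv (PySem.Str.len text) max_lines
    let st := words.foldl (splitStepA cpl max_lines) ([], [], 0)
    if st.2.1 = [] then st.1 else st.1 ++ [PySem.Str.join " " st.2.1]

-- ===== PORT B =====
-- B's inner while: consume words into `line` while the next word keeps the letter count ≤ cpl
def splitConsumeB (cpl : Int) : List String → Int → List String → List String × List String
  | [], _, line => (line, [])
  | w :: rs, length, line =>
    if length + PySem.Str.len w ≤ cpl then
      splitConsumeB cpl rs (length + PySem.Str.len w) (line ++ [w])
    else (line, w :: rs)

-- B's outer while: fuel = how many more non-final lines may still be started (max_lines - 1 - len(lines))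
def splitBuildB (cpl : Int) : Nat → List String → List String
  | _, [] => []
  | 0, rest => [PySem.Str.join " " rest]
  | r + 1, w :: rs =>
    let p := splitConsumeB cpl rs (PySem.Str.len w) [w]
    PySem.Str.join " " p.1 :: splitBuildB cpl r p.2

def split_into_lines_alt (text : String) (max_lines : Int) : List String :=
  let words := PySem.Str.split₀ text
  if (words.length : Int) ≤ max_lines then words
  else
    let cpl := PySem.Int.floordiv (PySem.Str.len text) max_lines
    splitBuildB cpl (max_lines - 1).toNat words

-- ===== PRECONDITION & SPEC =====
-- Pre_ excludes exactly the inputs where A raises ZeroDivisionError (max_lines = 0 with at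
-- least one word in text); B raises there too.
def Pre_split_into_lines (text : String) (max_lines : Int) : Prop :=
  max_lines = 0 → PySem.Str.split₀ text = []
instance (text : String) (max_lines : Int) : Decidable (Pre_split_into_lines text max_lines) := by
  unfold Pre_split_into_lines; infer_instance
def pvWitness_split_into_lines : String × Int := ("hello world foo bar", 2)

-- On inputs whose FIRST word alone is longer than len(text)//max_lines (with max_lines ≥ 2 and
-- more words than max_lines), A returns an accidental empty string as its first line
-- (' '.join of the still-empty current_line); B starts the first line with that word, which is
-- the intended split.
def D_split_into_lines (text : String) (max_lines : Int) : Prop :=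
  2 ≤ max_lines ∧ max_lines < ((PySem.Str.split₀ text).length : Int) ∧
    ∃ w, (PySem.Str.split₀ text).head? = some w ∧
      PySem.Int.floordiv (PySem.Str.len text) max_lines < PySem.Str.len w
instance (text : String) (max_lines : Int) : Decidable (D_split_into_lines text max_lines) := by
  unfold D_split_into_lines; infer_instance

def Spec_split_into_lines (text : String) (max_lines : Int) (out : List String) : Prop :=
  ¬ D_split_into_lines text max_lines → out = split_into_lines_alt text max_lines
instance (text : String) (max_lines : Int) (out : List String) : Decidable (Spec_split_into_lines text max_lines out) := by
  unfold Spec_split_into_lines; infer_instance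

def pvDiffWitness_split_into_lines : String × Int := ("abcde f g", 2)
def pvDiffWitnessOut_split_into_lines : (List String) × (List String) :=
  (["", "abcde f g"], ["abcde", "f g"])

-- ===== CLAIM (what is proved, stated in full; the proofs are below) =====
def Claim_unchanged_split_into_lines : Prop := ∀ (text : String) (max_lines : Int), Dom_split_into_lines text max_lines → Pre_split_into_lines text max_lines → Spec_split_into_lines text max_lines (split_into_lines text max_lines)
def Claim_changed_split_into_lines : Prop := Dom_split_into_lines (pvDiffWitness_split_into_lines.1) (pvDiffWitness_split_into_lines.2) ∧ Pre_split_into_lines (pvDiffWitness_split_into_lines.1) (pvDiffWitness_split_into_lines.2) ∧ D_split_into_lines (pvDiffWitness_split_into_lines.1) (pvDiffWitness_split_into_lines.2) ∧ split_into_lines (pvDiffWitness_split_into_lines.1) (pvDiffWitness_split_into_lines.2) = pvDiffWitnessOut_split_into_lines.1 ∧ split_into_lines_alt (pvDiffWitness_split_into_lines.1) (pvDiffWitness_split_into_lines.2) = pvDiffWitnessOut_split_into_lines.2 ∧ pvDiffWitnessOut_split_into_lines.1 ≠ pvDiffWitnessOut_split_into_lines.2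
def Claim_exact_split_into_lines : Prop := ∀ (text : String) (max_lines : Int), Dom_split_into_lines text max_lines → Pre_split_into_lines text max_lines → D_split_into_lines text max_lines → split_into_lines text max_lines ≠ split_into_lines_alt text max_lines

-- ===== LEMMAS AND PROOFS =====

-- generalized B-side: mid-line state (current line `cur`, letters `clen`, words `ws` left, fuel r)
def splitGlue (cpl : Int) : Nat → List String → Int → List String → List String
  | 0, cur, _, ws => [PySem.Str.join " " (cur ++ ws)]
  | r + 1, cur, clen, ws =>
    let p := splitConsumeB cpl ws clen cur
    PySem.Str.join " " p.1 :: splitBuildB cpl r p.2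

def splitFinishA (st : List String × List String × Int) : List String :=
  if st.2.1 = [] then st.1 else st.1 ++ [PySem.Str.join " " st.2.1]

lemma splitGlue_cons (cpl : Int) (r : Nat) (w : String) (ws : List String) :
    splitGlue cpl r [w] (PySem.Str.len w) ws = splitBuildB cpl r (w :: ws) := by
  cases r with
  | zero => simp [splitGlue, splitBuildB]
  | succ r => simp [splitGlue, splitBuildB]

lemma splitRun_eq (cpl ml : Int) :
    ∀ (ws : List String) (r : Nat) (lines cur : List String) (clen : Int),
      cur ≠ [] → (r : Int) = max (ml - 1 - (lines.length : Int)) 0 →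
      splitFinishA (List.foldl (splitStepA cpl ml) (lines, cur, clen) ws)
        = lines ++ splitGlue cpl r cur clen ws := by
  intro ws
  induction ws with
  | nil =>
    intro r lines cur clen hcur _
    cases r with
    | zero => simp [splitFinishA, splitGlue, hcur]
    | succ r => simp [splitFinishA, splitGlue, splitConsumeB, splitBuildB, hcur]
  | cons w ws ih =>
    intro r lines cur clen hcur hr
    simp only [List.foldl_cons]
    by_cases hc : clen + PySem.Str.len w > cpl ∧ (lines.length : Int) < ml - 1
    · -- A breaks: new line starts with w
      obtain ⟨r', rfl⟩ : ∃ r', r = r' + 1 := by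
        cases r with
        | zero => exfalso; omega
        | succ r => exact ⟨r, rfl⟩
      have hr' : (r' : Int) = max (ml - 1 - ((lines ++ [PySem.Str.join " " cur]).length : Int)) 0 := by
        simp only [List.length_append, List.length_cons, List.length_nil]
        push_cast; omega
      have := ih r' (lines ++ [PySem.Str.join " " cur]) [w] (PySem.Str.len w)
        (by simp) hr'
      rw [splitStepA, if_pos hc, this, splitGlue_cons]
      have hfit : ¬ clen + PySem.Str.len w ≤ cpl := by omega
      simp only [splitGlue, splitConsumeB, if_neg hfit]
      simp [List.append_assoc]
    · -- A appends w to the current line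
      have step : splitStepA cpl ml (lines, cur, clen) w = (lines, cur ++ [w], clen + PySem.Str.len w) := by
        rw [splitStepA, if_neg hc]
      rw [step, ih r lines (cur ++ [w]) (clen + PySem.Str.len w) (by simp) hr]
      congr 1
      cases r with
      | zero => simp [splitGlue, List.append_assoc]
      | succ r =>
        have hlt : (lines.length : Int) < ml - 1 := by omega
        have hfit : clen + PySem.Str.len w ≤ cpl := by
          by_contra h
          exact hc ⟨by omega, hlt⟩
        simp only [splitGlue, splitConsumeB, if_pos hfit]

theorem split_into_lines_spec : Claim_unchanged_split_into_lines := by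
  intro text ml _ hpre hnd
  unfold split_into_lines split_into_lines_alt
  by_cases hle : (((PySem.Str.split₀ text).length : Nat) : Int) ≤ ml
  · simp [hle]
  · rw [if_neg hle, if_neg hle]
    cases hws : PySem.Str.split₀ text with
    | nil => simp [splitBuildB]
    | cons w0 ws =>
      rw [hws] at hle
      set cpl := PySem.Int.floordiv (PySem.Str.len text) ml with hcpl
      -- the first loop iteration does not break (that would need D_)
      have hnobreak : ¬ ((0 : Int) + PySem.Str.len w0 > cpl ∧ (([] : List String).length : Int) < ml - 1) := by
        rintro ⟨h1, h2⟩
        apply hnd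
        refine ⟨by simpa using h2, ?_, w0, ?_, ?_⟩
        · rw [hws]; omega
        · rw [hws]; rfl
        · rw [← hcpl]; omega
      have step1 : List.foldl (splitStepA cpl ml) ([], [], 0) (w0 :: ws)
          = List.foldl (splitStepA cpl ml) ([], [w0], 0 + PySem.Str.len w0) ws := by
        simp only [List.foldl_cons]
        rw [splitStepA, if_neg hnobreak]
        simp
      have hr : (((ml - 1).toNat : Nat) : Int) = max (ml - 1 - (([] : List String).length : Int)) 0 := by
        simp only [List.length_nil, Nat.cast_zero]
        omega
      have main := splitRun_eq cpl ml ws ((ml - 1).toNat) [] [w0] (0 + PySem.Str.len w0)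
        (by simp) hr
      have key : splitFinishA (List.foldl (splitStepA cpl ml) ([], [], 0) (w0 :: ws))
          = splitBuildB cpl (ml - 1).toNat (w0 :: ws) := by
        rw [step1, main]
        have h0 : (0 : Int) + PySem.Str.len w0 = PySem.Str.len w0 := by ring
        rw [h0, splitGlue_cons]
        simp
      simpa [splitFinishA] using key

theorem split_into_lines_changed : Claim_changed_split_into_lines := by
  unfold Claim_changed_split_into_lines; decide

-- A's loop only ever appends to `lines`: the first line, once emitted, stays first
lemma splitLinesA_prefix (cpl ml : Int) :
    ∀ (ws : List String) (lines cur : List String) (clen : Int),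
      ∃ rest : List String,
        (List.foldl (splitStepA cpl ml) (lines, cur, clen) ws).1 = lines ++ rest := by
  intro ws
  induction ws with
  | nil => intro lines cur clen; exact ⟨[], by simp⟩
  | cons w ws ih =>
    intro lines cur clen
    simp only [List.foldl_cons]
    by_cases hc : clen + PySem.Str.len w > cpl ∧ (lines.length : Int) < ml - 1
    · rw [splitStepA, if_pos hc]
      obtain ⟨rest, hrest⟩ := ih (lines ++ [PySem.Str.join " " cur]) [w] (PySem.Str.len w)
      exact ⟨[PySem.Str.join " " cur] ++ rest, by rw [hrest]; simp⟩
    · rw [splitStepA, if_neg hc]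
      exact ih lines (cur ++ [w]) (clen + PySem.Str.len w)

-- B's inner while only ever appends to `line`
lemma splitConsumeB_prefix (cpl : Int) :
    ∀ (ws : List String) (clen : Int) (line : List String),
      ∃ t : List String, (splitConsumeB cpl ws clen line).1 = line ++ t := by
  intro ws
  induction ws with
  | nil => intro clen line; exact ⟨[], by simp [splitConsumeB]⟩
  | cons w ws ih =>
    intro clen line
    rw [splitConsumeB]
    by_cases hfit : clen + PySem.Str.len w ≤ cpl
    · rw [if_pos hfit]
      obtain ⟨t, ht⟩ := ih (clen + PySem.Str.len w) (line ++ [w])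
      exact ⟨[w] ++ t, by rw [ht]; simp⟩
    · exact ⟨[], by rw [if_neg hfit]; simp⟩

theorem split_into_lines_tight : Claim_exact_split_into_lines := by
  intro text ml _ hpre hD heq
  obtain ⟨hml2, hlen, w0, hhead, hw0⟩ := hD
  cases hws : PySem.Str.split₀ text with
  | nil => rw [hws] at hhead; simp at hhead
  | cons w0' ws =>
    rw [hws] at hhead hlen
    have hw0' : w0' = w0 := by simpa using hhead
    subst w0'
    unfold split_into_lines split_into_lines_alt at heq
    rw [hws] at heq
    have hle : ¬ (((w0 :: ws).length : Nat) : Int) ≤ ml := by omega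
    rw [if_neg hle, if_neg hle] at heq
    set cpl := PySem.Int.floordiv (PySem.Str.len text) ml with hcpl
    -- cpl ≥ 0, hence the first word is nonempty
    have hcpl0 : 0 ≤ cpl := by
      rw [hcpl, PySem.Int.floordiv_eq_ediv_of_pos (by omega : (0:Int) < ml)]
      exact Int.ediv_nonneg (by rw [PySem.Str.len_eq]; positivity) (by omega)
    have hw0ne : w0.toList ≠ [] := by
      intro h
      rw [PySem.Str.len_eq, h] at hw0
      simp at hw0
      omega
    -- the head of A's result is ' '.join([]) (the accidental empty line)
    have stepA1 : List.foldl (splitStepA cpl ml) ([], [], 0) (w0 :: ws)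
        = List.foldl (splitStepA cpl ml) ([PySem.Str.join " " []], [w0], PySem.Str.len w0) ws := by
      simp only [List.foldl_cons]
      rw [splitStepA, if_pos]
      · simp
      · constructor
        · omega
        · simp; omega
    obtain ⟨rest, hrest⟩ := splitLinesA_prefix cpl ml ws [PySem.Str.join " " []] [w0] (PySem.Str.len w0)
    obtain ⟨k, hk⟩ : ∃ k, (ml - 1).toNat = k + 1 := by
      refine ⟨(ml - 2).toNat, ?_⟩; omega
    obtain ⟨t, ht⟩ := splitConsumeB_prefix cpl ws (PySem.Str.len w0) [w0]
    simp only [stepA1, hk, splitBuildB] at heq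
    -- compare the heads of the two results
    have hheads := congrArg List.head? heq
    rw [hrest] at hheads
    simp only [ht, List.singleton_append, List.head?_cons] at hheads
    have hjoin : PySem.Str.join " " [] = PySem.Str.join " " (w0 :: t) := by
      split at hheads <;> simpa using hheads
    have htl := congrArg String.toList hjoin
    rw [PySem.Str.toList_join, PySem.Str.toList_join] at htl
    simp only [List.map_nil, List.map_cons, PySem.Chars.join_nil] at htl
    cases t with
    | nil =>
      rw [List.map_nil, PySem.Chars.join_singleton] at htl
      exact hw0ne htl.symm
    | cons b bs =>
      rw [List.map_cons, PySem.Chars.join_cons_cons] at htl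
      have := htl.symm
      simp [hw0ne] at this
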